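-- pv_equiv track=rewrite | github.com/samrussell/crctest | generate_k.py | calc_k
-- ===== SOURCE A (Python) =====
-- def calc_k(t):
--     endt = t - 31
--     output = 1
--
--     while endt > 0:
--         if output & 1:
--             output = 0xedb88320 ^ (output >> 1)
--         else:
--             output = output >> 1
--         endt -= 1
--
--     return output
-- ===== SOURCE B (Python) =====
-- def calc_k(t):
--     if t <= 31:
--         return 1
--     result = 0x80000000  # polynomial 1 (bit-reversed CRC-32 representation)
--     base = 0x40000000    # polynomial x
--     n = t
--     while n:
--         if n & 1:
--             result = _gf_mul(result, base)
--         base = _gf_mul(base, base)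
--         n >>= 1
--     return result
--
-- def _step(a):
--     if a & 1:
--         return 0xedb88320 ^ (a >> 1)
--     return a >> 1
--
-- def _gf_mul(a, b):
--     r = 0
--     for j in range(31, -1, -1):
--         if (b >> j) & 1:
--             r ^= a
--         a = _step(a)
--     return r
-- ===== Notes on version B (the rewrite author's own statement) =====
-- stated objective: faster
-- what changed: A repeatedly applies the CRC reverse step, once per remaining count, to reach its answer; B computes the same value as a power of x in GF(2^32) mod the CRC polynomial by square-and-multiply over the bits of t, with a fixed-width carry-less multiply-mod as the primitive.
import Mathlib
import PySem

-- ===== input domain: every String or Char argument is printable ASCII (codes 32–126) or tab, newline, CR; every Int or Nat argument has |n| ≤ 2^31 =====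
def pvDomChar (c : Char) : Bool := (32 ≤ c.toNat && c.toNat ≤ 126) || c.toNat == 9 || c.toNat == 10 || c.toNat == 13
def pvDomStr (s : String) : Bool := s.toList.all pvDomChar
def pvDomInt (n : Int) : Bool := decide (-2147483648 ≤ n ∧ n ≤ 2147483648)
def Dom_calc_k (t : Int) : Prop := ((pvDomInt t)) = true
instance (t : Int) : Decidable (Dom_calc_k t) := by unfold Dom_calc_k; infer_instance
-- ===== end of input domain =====

-- B replaces A's one-step-at-a-time CRC reverse-step iteration by square-and-multiply
-- exponentiation in GF(2^32) (carry-less multiply mod the CRC polynomial); same return value.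

-- ===== PORT A =====
-- the while loop of A, iterated (t-31).toNat times (while endt > 0)
def calc_k_loop : Nat → Int → Int
  | 0, output => output
  | n+1, output =>
      calc_k_loop n
        (if PySem.Int.band output 1 ≠ 0
         then PySem.Int.bxor 0xedb88320 (output >>> (1:Nat))
         else output >>> (1:Nat))

def calc_k (t : Int) : Int := calc_k_loop (t - 31).toNat 1

-- ===== PORT B =====
-- Source B's _step helper
def pvStep (a : Int) : Int :=
  if PySem.Int.band a 1 ≠ 0
  then PySem.Int.bxor 0xedb88320 (a >>> (1:Nat))
  else a >>> (1:Nat)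

-- Source B's _gf_mul: carry-less multiplication mod the CRC-32 polynomial
-- (loop 'for j in range(31, -1, -1)' with state (r, a))
def pvGfMul (a b : Int) : Int :=
  (List.foldl
    (fun (s : Int × Int) (j : Int) =>
      (if PySem.Int.band (b >>> j) 1 ≠ 0 then PySem.Int.bxor s.1 s.2 else s.1,
       pvStep s.2))
    (0, a) (PySem.List.pyRange 31 (-1) (-1))).1

-- Source B's 'while n:' square-and-multiply loop (n ≤ 0 guard only makes it total;
-- every call site has n > 0)
def pvPowLoop (result base n : Int) : Int :=
  if n ≤ 0 then result
  else pvPowLoop (if PySem.Int.band n 1 ≠ 0 then pvGfMul result base else result)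
         (pvGfMul base base) (n >>> (1:Nat))
termination_by n.toNat
decreasing_by
  have h2 : n >>> (1:Nat) = n / 2 ^ 1 := Int.shiftRight_eq_div_pow n 1
  simp only [pow_one] at h2
  omega

def calc_k_alt (t : Int) : Int :=
  if t ≤ 31 then 1 else pvPowLoop 0x80000000 0x40000000 t

-- ===== PRECONDITION & SPEC =====
def Spec_calc_k (t : Int) (out : Int) : Prop := out = calc_k_alt t
instance (t : Int) (out : Int) : Decidable (Spec_calc_k t out) := by unfold Spec_calc_k; infer_instance

-- ===== CLAIM (what is proved, stated in full; the proofs are below) =====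
def Claim_equal_calc_k : Prop := ∀ (t : Int), Dom_calc_k t → Spec_calc_k t (calc_k t)

-- ===== LEMMAS AND PROOFS =====

-- Nat-level model of the step and of the loops (all bit arithmetic done in ℕ)
def sN (a : Nat) : Nat :=
  if a &&& 1 ≠ 0 then 0xedb88320 ^^^ (a >>> 1) else a >>> 1

def iterN : Nat → Nat → Nat
  | 0, a => a
  | n+1, a => iterN n (sN a)

-- one iteration of Source B's gf_mul loop at index j, on Nat state
def gstep (b j : Nat) (s : Nat × Nat) : Nat × Nat :=
  (if (b >>> j) &&& 1 ≠ 0 then s.1 ^^^ s.2 else s.1, sN s.2)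

-- the gf_mul loop over j = k, k-1, …, 0
def foldD (b : Nat) : Nat → (Nat × Nat) → Nat × Nat
  | 0, s => gstep b 0 s
  | k+1, s => foldD b k (gstep b (k+1) s)

def mulN (a b : Nat) : Nat := (foldD b 31 (0, a)).1

-- ---- casts: the Int ports compute the Nat model ----

theorem step_cast (a : Nat) : pvStep (a : Int) = ((sN a : Nat) : Int) := by
  have h1 : PySem.Int.band (a : Int) 1 = ((a &&& 1 : Nat) : Int) := by
    simpa using PySem.Int.band_natCast a 1
  have h2 : ((a : Int) >>> (1:Nat)) = ((a >>> 1 : Nat) : Int) := rfl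
  have h3 : PySem.Int.bxor 0xedb88320 ((a >>> 1 : Nat) : Int)
      = ((0xedb88320 ^^^ (a >>> 1) : Nat) : Int) := by
    simpa using PySem.Int.bxor_natCast 0xedb88320 (a >>> 1)
  simp only [pvStep, sN, h1, h2, h3, ne_eq, Int.natCast_eq_zero, apply_ite (fun n : Nat => (n : Int))]

theorem loopA_cast (k : Nat) (a : Nat) : calc_k_loop k (a : Int) = ((iterN k a : Nat) : Int) := by
  induction k generalizing a with
  | zero => rfl
  | succ k ih =>
      have hs := step_cast a
      simp only [pvStep] at hs
      simp only [calc_k_loop, iterN, hs, ih]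

theorem gstep_cast (b j r a : Nat) :
    ((if PySem.Int.band ((b : Int) >>> ((j : Nat) : Int)) 1 ≠ 0
        then PySem.Int.bxor (r : Int) (a : Int) else (r : Int),
      pvStep (a : Int)) : Int × Int)
      = ((((gstep b j (r, a)).1 : Nat) : Int), (((gstep b j (r, a)).2 : Nat) : Int)) := by
  have hsh : ((b : Int) >>> ((j : Nat) : Int)) = ((b >>> j : Nat) : Int) := by
    rw [Int.shiftRight_natCast]
  have h1 : PySem.Int.band ((b >>> j : Nat) : Int) 1 = (((b >>> j) &&& 1 : Nat) : Int) := by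
    simpa using PySem.Int.band_natCast (b >>> j) 1
  have h2 : PySem.Int.bxor (r : Int) (a : Int) = ((r ^^^ a : Nat) : Int) := by
    simp
  simp only [gstep, hsh, h1, h2, step_cast, ne_eq, Int.natCast_eq_zero,
    apply_ite (fun n : Nat => (n : Int))]

theorem gfold_cast (b : Nat) : ∀ (k : Nat) (r a : Nat),
    List.foldl
      (fun (s : Int × Int) (j : Int) =>
        (if PySem.Int.band ((b : Int) >>> j) 1 ≠ 0 then PySem.Int.bxor s.1 s.2 else s.1,
         pvStep s.2))
      (((r : Nat) : Int), ((a : Nat) : Int)) (((List.range (k+1)).reverse).map (Nat.cast : Nat → Int))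
      = ((((foldD b k (r, a)).1 : Nat) : Int), (((foldD b k (r, a)).2 : Nat) : Int)) := by
  intro k
  induction k with
  | zero =>
      intro r a
      simpa [foldD] using gstep_cast b 0 r a
  | succ k ih =>
      intro r a
      have hl : (List.range (k+2)).reverse = (k+1) :: (List.range (k+1)).reverse := by
        simp [List.range_succ]
      rw [hl, List.map_cons, List.foldl_cons, gstep_cast b (k+1) r a, ih]
      rfl

theorem gfmul_cast (a b : Nat) : pvGfMul (a : Int) (b : Int) = ((mulN a b : Nat) : Int) := by
  have hr : PySem.List.pyRange 31 (-1) (-1) = ((List.range 32).reverse.map (Nat.cast : Nat → Int)) := by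
    decide
  have h0 : ((0 : Int), (a : Int)) = (((0 : Nat) : Int), ((a : Nat) : Int)) := by simp
  have := gfold_cast b 31 0 a
  simp only [pvGfMul, mulN, hr, h0, this]

-- ---- algebra of the step: linearity over XOR ----

theorem sN_zero : sN 0 = 0 := by decide

theorem xor_left_comm3 (a b c : Nat) : a ^^^ (b ^^^ c) = b ^^^ (a ^^^ c) := by
  rw [← Nat.xor_assoc, Nat.xor_comm a b, Nat.xor_assoc]

theorem xor_cc (c a b : Nat) : (c ^^^ a) ^^^ (c ^^^ b) = a ^^^ b := by
  rw [Nat.xor_assoc, xor_left_comm3 a c b, ← Nat.xor_assoc, Nat.xor_self, Nat.zero_xor]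

theorem sN_xor (x y : Nat) : sN (x ^^^ y) = sN x ^^^ sN y := by
  have h1 : (x ^^^ y) &&& 1 = (x &&& 1) ^^^ (y &&& 1) := Nat.and_xor_distrib_right ..
  have h2 : (x ^^^ y) >>> 1 = x >>> 1 ^^^ y >>> 1 := Nat.shiftRight_xor_distrib ..
  have hxm := Nat.and_one_is_mod x
  have hym := Nat.and_one_is_mod y
  have hx : x &&& 1 = 0 ∨ x &&& 1 = 1 := by omega
  have hy : y &&& 1 = 0 ∨ y &&& 1 = 1 := by omega
  unfold sN
  rcases hx with hx | hx <;> rcases hy with hy | hy <;>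
    simp [h1, h2, hx, hy]
  · rw [xor_left_comm3]
  · rw [← Nat.xor_assoc]
  · rw [xor_cc]

-- the fold commutes with the step applied to both state components
theorem gstep_sN (b j r a : Nat) :
    gstep b j (sN r, sN a) = (sN (gstep b j (r, a)).1, sN (gstep b j (r, a)).2) := by
  simp only [gstep]
  split <;> simp [sN_xor]

theorem foldD_sN (b : Nat) : ∀ (k : Nat) (r a : Nat),
    foldD b k (sN r, sN a) = (sN (foldD b k (r, a)).1, sN (foldD b k (r, a)).2) := by
  intro k
  induction k with
  | zero => intro r a; simpa [foldD] using gstep_sN b 0 r a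
  | succ k ih =>
      intro r a
      show foldD b k (gstep b (k+1) (sN r, sN a)) = _
      rw [gstep_sN b (k+1) r a, ih]
      rfl

theorem mulN_sN (a b : Nat) : mulN (sN a) b = sN (mulN a b) := by
  have h := foldD_sN b 31 0 a
  rw [sN_zero] at h
  unfold mulN
  rw [h]

-- ---- gf_mul with first argument 2^31 (the constant 1 polynomial) is identity ----

theorem two_pow_xor_eq_add (n m : Nat) (h : m < 2^n) : 2^n ^^^ m = 2^n + m := by
  induction n generalizing m with
  | zero =>
      have hm : m = 0 := by omega
      subst hm; decide
  | succ n ih =>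
      have hp : 2^(n+1) = 2 * 2^n := by rw [pow_succ]; ring
      have hs : (2^(n+1) ^^^ m) >>> 1 = (2^(n+1)) >>> 1 ^^^ m >>> 1 :=
        Nat.shiftRight_xor_distrib ..
      have hd1 : ∀ z : Nat, z >>> 1 = z / 2 := by
        intro z; rw [Nat.shiftRight_eq_div_pow, pow_one]
      have hmd : m / 2 < 2^n := by omega
      have hih := ih (m / 2) hmd
      have hdiv : (2^(n+1) ^^^ m) / 2 = 2^n + m / 2 := by
        rw [← hd1, hs, hd1, hd1, show 2^(n+1)/2 = 2^n by omega, hih]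
      have hmod : (2^(n+1) ^^^ m) % 2 = (2^(n+1) + m) % 2 := Nat.xor_mod_two_eq
      omega

theorem foldD_one : ∀ (k : Nat) (r b : Nat),
    (foldD b k (r, 2^k)).1 = r ^^^ (b % 2^(k+1)) := by
  intro k
  induction k with
  | zero =>
      intro r b
      have hb := Nat.and_one_is_mod b
      by_cases h : b &&& 1 = 0
      · have h2 : b % 2 = 0 := by omega
        simp [foldD, gstep, Nat.shiftRight_zero, h2]
      · have h2 : b % 2 = 1 := by omega
        simp [foldD, gstep, Nat.shiftRight_zero, h2]
  | succ k ih =>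
      intro r b
      have hp : 2^(k+1) = 2 * 2^k := by rw [pow_succ]; ring
      have hsp : sN (2^(k+1)) = 2^k := by
        have h1 : 2^(k+1) &&& 1 = 0 := by
          have := Nat.and_one_is_mod (2^(k+1)); omega
        simp [sN, h1, Nat.shiftRight_eq_div_pow, pow_one]
        omega
      have hbit : (b >>> (k+1)) &&& 1 = b / 2^(k+1) % 2 := by
        rw [Nat.and_one_is_mod, Nat.shiftRight_eq_div_pow]
      have hmp : b % 2^(k+1+1) = b % 2^(k+1) + 2^(k+1) * (b / 2^(k+1) % 2) :=
        Nat.mod_pow_succ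
      have hmlt : b % 2^(k+1) < 2^(k+1) := Nat.mod_lt _ (by positivity)
      show (foldD b k (gstep b (k+1) (r, 2^(k+1)))).1 = _
      by_cases h : (b >>> (k+1)) &&& 1 = 0
      · have hg : gstep b (k+1) (r, 2^(k+1)) = (r, 2^k) := by
          simp only [gstep]
          rw [if_neg (by simpa using h), hsp]
        rw [hg, ih]
        have hb0 : b / 2^(k+1) % 2 = 0 := by omega
        rw [hb0, Nat.mul_zero] at hmp
        rw [hmp]
        simp
      · have hg : gstep b (k+1) (r, 2^(k+1)) = (r ^^^ 2^(k+1), 2^k) := by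
          simp only [gstep]
          rw [if_pos h, hsp]
        rw [hg, ih, Nat.xor_assoc, two_pow_xor_eq_add (k+1) _ hmlt]
        have h2 := Nat.mod_two_eq_zero_or_one (b / 2^(k+1))
        have hb1 : b / 2^(k+1) % 2 = 1 := by omega
        rw [hb1, Nat.mul_one] at hmp
        have he : 2^(k+1) + b % 2^(k+1) = b % 2^(k+1+1) := by omega
        rw [he]

theorem mulN_one (b : Nat) (hb : b < 2^32) : mulN (2^31) b = b := by
  unfold mulN
  rw [foldD_one 31 0 b, Nat.zero_xor, Nat.mod_eq_of_lt hb]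

-- ---- iterates ----

theorem iterN_add (i j : Nat) (a : Nat) : iterN i (iterN j a) = iterN (j + i) a := by
  induction j generalizing a with
  | zero => simp [iterN]
  | succ j ih => simp only [iterN, ih, Nat.succ_add]

theorem sN_lt (a : Nat) (h : a < 2^32) : sN a < 2^32 := by
  have hs : a >>> 1 = a / 2 := by rw [Nat.shiftRight_eq_div_pow, pow_one]
  unfold sN
  split
  · exact Nat.xor_lt_two_pow (by norm_num) (by omega)
  · omega

theorem iterN_lt (n : Nat) : iterN n (2^31) < 2^32 := by
  suffices h : ∀ (n : Nat) (a : Nat), a < 2^32 → iterN n a < 2^32 by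
    exact h n (2^31) (by norm_num)
  intro n
  induction n with
  | zero => intro a ha; exact ha
  | succ n ih => intro a ha; exact ih (sN a) (sN_lt a ha)

theorem mulN_iter (i : Nat) (a b : Nat) : mulN (iterN i a) b = iterN i (mulN a b) := by
  induction i generalizing a with
  | zero => rfl
  | succ i ih => simp only [iterN, ih, mulN_sN]

theorem mulN_pow (i j : Nat) :
    mulN (iterN i (2^31)) (iterN j (2^31)) = iterN (i + j) (2^31) := by
  rw [mulN_iter, mulN_one _ (iterN_lt j), iterN_add, Nat.add_comm j i]

-- ---- the square-and-multiply loop computes iterN ----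

theorem powLoop_iter_aux : ∀ (m : Nat) (p : Nat), p = m → ∀ (i j : Nat),
    pvPowLoop ((iterN i (2^31) : Nat) : Int) ((iterN j (2^31) : Nat) : Int) ((p : Nat) : Int)
      = ((iterN (i + p * j) (2^31) : Nat) : Int) := by
  intro m
  induction m using Nat.strong_induction_on with
  | _ m ih =>
    intro p hp i j
    rw [pvPowLoop]
    by_cases hp0 : p = 0
    · subst hp0
      rw [if_pos (by simp)]
      simp
    · rw [if_neg (by omega)]
      have hband : PySem.Int.band ((p : Nat) : Int) 1 = (((p &&& 1 : Nat) : Nat) : Int) := by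
        simpa using PySem.Int.band_natCast p 1
      have hsh : ((p : Nat) : Int) >>> (1:Nat) = ((p >>> 1 : Nat) : Int) := rfl
      have hdiv : p >>> 1 = p / 2 := by rw [Nat.shiftRight_eq_div_pow, pow_one]
      have hlt : p >>> 1 < m := by omega
      have hmod := Nat.and_one_is_mod p
      rw [hband, hsh]
      by_cases hodd : p &&& 1 = 0
      · rw [if_neg (by simp [hodd])]
        rw [gfmul_cast, mulN_pow j j]
        rw [ih (p >>> 1) hlt (p >>> 1) rfl i (j + j)]
        congr 2
        have hpe : 2 * (p / 2) = p := by omega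
        rw [hdiv]
        conv_rhs => rw [← hpe]
        ring
      · rw [if_pos (by simp; omega)]
        rw [gfmul_cast, gfmul_cast, mulN_pow i j, mulN_pow j j]
        rw [ih (p >>> 1) hlt (p >>> 1) rfl (i + j) (j + j)]
        congr 2
        have hpo : 2 * (p / 2) + 1 = p := by omega
        rw [hdiv]
        conv_rhs => rw [← hpo]
        ring

-- ===== VERDICT (by name: the statement is the Claim_ definition above) =====
theorem calc_k_spec : Claim_equal_calc_k := by
  intro t _
  unfold Spec_calc_k calc_k calc_k_alt
  by_cases ht : t ≤ 31
  · rw [if_pos ht, show (t - 31).toNat = 0 from by omega]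
    rfl
  · rw [if_neg ht]
    have h1 : (1 : Int) = (((1 : Nat) : Nat) : Int) := by simp
    rw [h1, loopA_cast]
    have hA : iterN (t - 31).toNat 1 = iterN (31 + (t - 31).toNat) (2^31) := by
      rw [← iterN_add, show iterN 31 (2^31) = 1 from by decide]
    rw [hA]
    have hB0 : (0x80000000 : Int) = ((iterN 0 (2^31) : Nat) : Int) := by decide
    have hB1 : (0x40000000 : Int) = ((iterN 1 (2^31) : Nat) : Int) := by decide
    have ht' : t = ((t.toNat : Nat) : Int) := by omega
    rw [hB0, hB1, ht', powLoop_iter_aux t.toNat t.toNat rfl 0 1]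
    congr 2
    omega
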